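-- pv_equiv track=rewrite | github.com/quangglammm/data_mining_project | src/domain/use_cases/mine_low_yield_patterns.py | _find_first_breaker
-- ===== SOURCE A (Python) =====
-- from typing import List, Tuple, Dict, Set, Any
--
-- def _find_first_breaker(sequence: List[str], golden: Tuple[str, ...]) -> str | None:
--     """Tìm sự kiện đầu tiên phá vỡ chuỗi golden."""
--     pos = 0
--     for event in golden:
--         try:
--             idx = sequence.index(event, pos)
--             pos = idx + 1
--         except ValueError:
--             return None
--     return sequence[pos] if pos < len(sequence) else None
-- ===== SOURCE B (Python) =====
-- def _find_first_breaker(sequence, golden):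
--     g = 0
--     pos = 0
--     for i, event in enumerate(sequence):
--         if g < len(golden) and event == golden[g]:
--             g += 1
--             pos = i + 1
--     if g < len(golden):
--         return None
--     return sequence[pos] if pos < len(sequence) else None
-- ===== Notes on version B (the rewrite author's own statement) =====
-- stated objective: alternative
-- what changed: Replaced the loop over golden with repeated sequence.index(event, pos) calls (and try/except for a failed match) by a single forward enumerate scan over sequence that advances a pointer into golden and records the position after the last match.
import Mathlib
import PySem

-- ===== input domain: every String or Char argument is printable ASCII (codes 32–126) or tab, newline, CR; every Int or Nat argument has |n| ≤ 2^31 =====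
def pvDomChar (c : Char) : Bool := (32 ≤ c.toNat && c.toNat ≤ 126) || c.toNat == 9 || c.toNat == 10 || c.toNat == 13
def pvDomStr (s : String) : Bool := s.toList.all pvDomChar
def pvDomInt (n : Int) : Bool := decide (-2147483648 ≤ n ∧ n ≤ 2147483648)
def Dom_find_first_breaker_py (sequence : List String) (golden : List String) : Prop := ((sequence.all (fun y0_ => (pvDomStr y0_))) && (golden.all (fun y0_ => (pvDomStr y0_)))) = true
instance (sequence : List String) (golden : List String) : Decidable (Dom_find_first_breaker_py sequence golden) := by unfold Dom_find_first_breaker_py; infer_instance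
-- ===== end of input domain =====

-- B replaces A's loop over `golden` with `.index(event, pos)` calls by a single
-- forward scan over `sequence` that advances a pointer into `golden` (alternative
-- decomposition, same cost).


-- ===== PORT A =====
-- sequence.index(event, pos): first index ≥ i of e in the remaining list; none = ValueError
def pvIdxFrom : List String → Nat → String → Option Nat
  | [], _, _ => none
  | x :: xs, i, e => if x = e then some i else pvIdxFrom xs (i + 1) e

-- the `for event in golden` loop, carrying pos; none = the except-return
def pvALoop (sequence : List String) : List String → Nat → Option Nat
  | [], pos => some pos
  | e :: gs, pos =>
    match pvIdxFrom (sequence.drop pos) pos e with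
    | none => none
    | some idx => pvALoop sequence gs (idx + 1)

def find_first_breaker_py (sequence : List String) (golden : List String) : Option String :=
  match pvALoop sequence golden 0 with
  | none => none
  | some pos => if pos < sequence.length then sequence[pos]? else none

-- ===== PORT B =====
-- the `for i, event in enumerate(sequence)` loop, carrying (g, pos)
def pvBLoop (golden : List String) : List String → Nat → Nat → Nat → Nat × Nat
  | [], _, g, pos => (g, pos)
  | x :: xs, i, g, pos =>
    match golden[g]? with
    | some e => if x = e then pvBLoop golden xs (i + 1) (g + 1) (i + 1)
                else pvBLoop golden xs (i + 1) g pos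
    | none => pvBLoop golden xs (i + 1) g pos

def find_first_breaker_py_alt (sequence : List String) (golden : List String) : Option String :=
  let r := pvBLoop golden sequence 0 0 0
  if r.1 < golden.length then none
  else if r.2 < sequence.length then sequence[r.2]? else none

-- ===== PRECONDITION & SPEC =====
def Spec_find_first_breaker_py (sequence : List String) (golden : List String) (out : Option String) : Prop := out = find_first_breaker_py_alt sequence golden
instance (sequence : List String) (golden : List String) (out : Option String) : Decidable (Spec_find_first_breaker_py sequence golden out) := by unfold Spec_find_first_breaker_py; infer_instance

-- ===== CLAIM (what is proved, stated in full; the proofs are below) =====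
def Claim_equal_find_first_breaker_py : Prop := ∀ (sequence : List String) (golden : List String), Dom_find_first_breaker_py sequence golden → Spec_find_first_breaker_py sequence golden (find_first_breaker_py sequence golden)

-- ===== LEMMAS AND PROOFS =====

-- canonical greedy subsequence matcher, structural on the sequence
def pvSpec : List String → List String → Nat → Option Nat
  | _, [], i => some i
  | [], _ :: _, _ => none
  | x :: xs, e :: gs, i =>
    if x = e then pvSpec xs gs (i + 1) else pvSpec xs (e :: gs) (i + 1)

theorem pvALoop_eq_spec (sequence : List String) :
    ∀ (xs gs : List String) (pos : Nat), sequence.drop pos = xs →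
      pvALoop sequence gs pos = pvSpec xs gs pos := by
  intro xs
  induction xs with
  | nil =>
    intro gs pos h
    cases gs with
    | nil => simp [pvALoop, pvSpec]
    | cons e gs' => simp [pvALoop, pvSpec, h, pvIdxFrom]
  | cons x xs' ih =>
    intro gs pos h
    have hd : sequence.drop (pos + 1) = xs' := by
      rw [← List.tail_drop, h]; rfl
    cases gs with
    | nil => simp [pvALoop, pvSpec]
    | cons e gs' =>
      by_cases hxe : x = e
      · simp [pvALoop, pvSpec, h, pvIdxFrom, hxe, ih gs' (pos + 1) hd]
      · have hb : pvALoop sequence (e :: gs') (pos + 1) = pvSpec xs' (e :: gs') (pos + 1) :=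
          ih (e :: gs') (pos + 1) hd
        simp [pvALoop, pvSpec, h, pvIdxFrom, hxe, hd] at hb ⊢
        exact hb

theorem pvBLoop_done (golden : List String) :
    ∀ (xs : List String) (i g pos : Nat), golden.length ≤ g →
      pvBLoop golden xs i g pos = (g, pos) := by
  intro xs
  induction xs with
  | nil => intro i g pos _; rfl
  | cons x xs' ih =>
    intro i g pos hg
    have : golden[g]? = none := by
      rw [List.getElem?_eq_none_iff]; exact hg
    simp [pvBLoop, this, ih _ _ _ hg]

theorem pvBLoop_active (golden : List String) :
    ∀ (xs : List String) (i g pos : Nat), g < golden.length →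
      (if (pvBLoop golden xs i g pos).1 < golden.length then none
       else some (pvBLoop golden xs i g pos).2) = pvSpec xs (golden.drop g) i := by
  intro xs
  induction xs with
  | nil =>
    intro i g pos hg
    cases hgs : golden.drop g with
    | nil =>
      have : golden.length ≤ g := List.drop_eq_nil_iff.mp hgs
      omega
    | cons e gs' => simp [pvBLoop, pvSpec, hg]
  | cons x xs' ih =>
    intro i g pos hg
    have hget : golden[g]? = some golden[g] := List.getElem?_eq_getElem hg
    have hdrop : golden.drop g = golden[g] :: golden.drop (g + 1) :=
      List.drop_eq_getElem_cons hg
    rw [hdrop]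
    by_cases hxe : x = golden[g]
    · rw [show pvBLoop golden (x :: xs') i g pos = pvBLoop golden xs' (i + 1) (g + 1) (i + 1) by
        simp [pvBLoop, hget, hxe]]
      rw [show pvSpec (x :: xs') (golden[g] :: golden.drop (g + 1)) i
            = pvSpec xs' (golden.drop (g + 1)) (i + 1) by simp [pvSpec, hxe]]
      by_cases hg1 : g + 1 < golden.length
      · exact ih (i + 1) (g + 1) (i + 1) hg1
      · rw [pvBLoop_done golden xs' (i + 1) (g + 1) (i + 1) (by omega)]
        rw [List.drop_eq_nil_iff.mpr (by omega)]
        simp only [pvSpec]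
        rw [if_neg (by omega)]
    · rw [show pvBLoop golden (x :: xs') i g pos = pvBLoop golden xs' (i + 1) g pos by
        simp [pvBLoop, hget, hxe]]
      rw [show pvSpec (x :: xs') (golden[g] :: golden.drop (g + 1)) i
            = pvSpec xs' (golden[g] :: golden.drop (g + 1)) (i + 1) by simp [pvSpec, hxe]]
      have h2 := ih (i + 1) g pos hg
      rwa [hdrop] at h2

-- ===== VERDICT (by name: the statement is the Claim_ definition above) =====
theorem find_first_breaker_py_spec : Claim_equal_find_first_breaker_py := by
  intro sequence golden _
  unfold Spec_find_first_breaker_py find_first_breaker_py find_first_breaker_py_alt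
  have hA : pvALoop sequence golden 0 = pvSpec sequence golden 0 :=
    pvALoop_eq_spec sequence sequence golden 0 (by simp)
  by_cases hg : 0 < golden.length
  · have hB := pvBLoop_active golden sequence 0 0 0 hg
    simp only [List.drop_zero] at hB
    rw [hA, ← hB]
    cases h : pvBLoop golden sequence 0 0 0 with
    | mk g' pos' => by_cases h1 : g' < golden.length <;> simp [h1]
  · have hgl : golden = [] := by
      cases golden with
      | nil => rfl
      | cons a b => simp at hg
    subst hgl
    have hB := pvBLoop_done [] sequence 0 0 0 (by simp)
    simp [pvSpec] at hA
    simp [hA, hB]
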